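-- pv_equiv track=rewrite | github.com/IvanComp/AP4Fed | build_paper_experiments.py | dynamic_xticks
-- ===== SOURCE A (Python) =====
-- from typing import Any, Dict, Iterable, List, Optional, Sequence, Tuple
--
-- def dynamic_xticks(rounds: Iterable[int]) -> List[int]:
--     ordered = sorted(set(int(r) for r in rounds))
--     if not ordered:
--         return []
--     max_round = ordered[-1]
--     if max_round <= 10:
--         return ordered
--     if max_round <= 30:
--         step = 5
--     elif max_round <= 100:
--         step = 10
--     else:
--         step = max(10, max_round // 10)
--     ticks = [ordered[0]]
--     ticks.extend(r for r in ordered if r % step == 0 and r not in ticks)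
--     if ordered[-1] not in ticks:
--         ticks.append(ordered[-1])
--     return ticks
-- ===== SOURCE B (Python) =====
-- from typing import Iterable, List
--
-- def dynamic_xticks(rounds: Iterable[int]) -> List[int]:
--     ordered = sorted(set(int(r) for r in rounds))
--     if not ordered:
--         return []
--     lo, hi = ordered[0], ordered[-1]
--     if hi <= 10:
--         return ordered
--     if hi <= 30:
--         step = 5
--     elif hi <= 100:
--         step = 10
--     else:
--         step = max(10, hi // 10)
--     # two-pointer merge of the sorted data with the implicit grid of step-multiples:
--     # m is always the smallest grid point that could still become a tick
--     ticks = [lo]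
--     m = (lo // step + 1) * step          # smallest grid point above lo
--     for r in ordered[1:]:
--         if m < r:
--             m = -(-r // step) * step     # jump to the smallest grid point >= r
--         if r == m:
--             ticks.append(r)
--             m += step
--     if hi not in ticks:
--         ticks.append(hi)
--     return ticks
-- ===== Notes on version B (the rewrite author's own statement) =====
-- stated objective: alternative
-- what changed: Instead of A's scan that tests each value for divisibility and for membership in the growing ticks list, B merges the sorted data two-pointer-style with the implicit grid of step multiples, carrying the next candidate grid point and advancing it by ceiling division.
import Mathlib
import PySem

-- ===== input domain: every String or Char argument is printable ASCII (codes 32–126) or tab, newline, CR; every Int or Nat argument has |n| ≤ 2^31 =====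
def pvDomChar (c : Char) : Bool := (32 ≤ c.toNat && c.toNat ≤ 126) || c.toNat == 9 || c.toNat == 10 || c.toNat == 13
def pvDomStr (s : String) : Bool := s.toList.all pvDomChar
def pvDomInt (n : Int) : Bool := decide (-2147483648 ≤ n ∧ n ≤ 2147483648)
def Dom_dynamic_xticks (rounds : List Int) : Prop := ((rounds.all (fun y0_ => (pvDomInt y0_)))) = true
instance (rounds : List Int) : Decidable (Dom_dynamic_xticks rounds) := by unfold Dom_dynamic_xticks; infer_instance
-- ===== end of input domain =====

-- B replaces A's scan testing divisibility and membership in the growing ticks list by a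
-- two-pointer merge of the sorted data with the implicit grid of step-multiples (the next
-- candidate grid point is carried along and advanced by ceiling division);
-- objective: alternative algorithm, same results.

-- ===== PORT A =====
def dynamic_xticks (rounds : List Int) : List Int :=
  let ordered := PySem.List.sorted (PySem.Set.ofList rounds) (fun x => x)
  if ordered = [] then []
  else
    let max_round := ordered.getLast!
    if max_round ≤ 10 then ordered
    else
      let step : Int :=
        if max_round ≤ 30 then 5
        else if max_round ≤ 100 then 10
        else max 10 (PySem.Int.floordiv max_round 10)
      let ticks := [ordered.head!]
      let ticks := ordered.foldl
        (fun acc r => if PySem.Int.mod r step = 0 ∧ r ∉ acc then acc ++ [r] else acc) ticks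
      if ordered.getLast! ∉ ticks then ticks ++ [ordered.getLast!] else ticks

-- ===== PORT B =====
def dynamic_xticks_alt (rounds : List Int) : List Int :=
  let ordered := PySem.List.sorted (PySem.Set.ofList rounds) (fun x => x)
  if ordered = [] then []
  else
    let lo := ordered.head!
    let hi := ordered.getLast!
    if hi ≤ 10 then ordered
    else
      let step : Int :=
        if hi ≤ 30 then 5
        else if hi ≤ 100 then 10
        else max 10 (PySem.Int.floordiv hi 10)
      -- the for-loop over ordered[1:] carries the pair (ticks, m); -(-r // step) is ceiling division
      let st := (PySem.List.slice ordered (some 1) none).foldl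
        (fun (st : List Int × Int) r =>
          let m := if st.2 < r then (-(PySem.Int.floordiv (-r) step)) * step else st.2
          if r = m then (st.1 ++ [r], m + step) else (st.1, m))
        ([lo], (PySem.Int.floordiv lo step + 1) * step)
      let ticks := st.1
      if hi ∉ ticks then ticks ++ [hi] else ticks

-- ===== PRECONDITION & SPEC =====
def Spec_dynamic_xticks (rounds : List Int) (out : List Int) : Prop := out = dynamic_xticks_alt rounds
instance (rounds : List Int) (out : List Int) : Decidable (Spec_dynamic_xticks rounds out) := by unfold Spec_dynamic_xticks; infer_instance

-- ===== CLAIM (what is proved, stated in full; the proofs are below) =====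
def Claim_equal_dynamic_xticks : Prop := ∀ (rounds : List Int), Dom_dynamic_xticks rounds → Spec_dynamic_xticks rounds (dynamic_xticks rounds)

-- ===== LEMMAS AND PROOFS =====

-- A's stateful extend-loop: on a strictly increasing list none of whose elements is already
-- in the accumulator, the `r not in ticks` test never fires and the loop is a plain filter.
theorem foldA_eq_filter (step : Int) :
    ∀ (l acc : List Int), l.Pairwise (· < ·) → (∀ x ∈ l, x ∉ acc) →
    l.foldl (fun acc r => if PySem.Int.mod r step = 0 ∧ r ∉ acc then acc ++ [r] else acc) acc
      = acc ++ l.filter (fun r => decide (PySem.Int.mod r step = 0)) := by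
  intro l
  induction l with
  | nil => intro acc _ _; simp
  | cons x t ih =>
    intro acc hpw hnot
    have hx : x ∉ acc := hnot x (by simp)
    rw [List.foldl_cons]
    by_cases hm : PySem.Int.mod x step = 0
    · rw [if_pos ⟨hm, hx⟩, ih (acc ++ [x]) hpw.of_cons ?side]
      · simp [hm]
      case side =>
        intro y hy
        simp only [List.mem_append, List.mem_singleton]
        rintro (h | h)
        · exact hnot y (List.mem_cons_of_mem _ hy) h
        · exact ((List.pairwise_cons.1 hpw).1 y hy).ne' h
    · rw [if_neg (fun h => hm h.1), ih acc hpw.of_cons (fun y hy => hnot y (List.mem_cons_of_mem _ hy))]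
      simp [hm]

-- B's two-pointer merge: on a strictly increasing list, as long as the carried grid point m is a
-- multiple of step not exceeding any multiple still in the list, the loop is the same plain filter.
theorem foldB_eq_filter (step : Int) (hstep : 0 < step) :
    ∀ (l acc : List Int) (m : Int), l.Pairwise (· < ·) → step ∣ m →
    (∀ x ∈ l, step ∣ x → m ≤ x) →
    (l.foldl (fun (st : List Int × Int) r =>
          if r = (if st.2 < r then (-(PySem.Int.floordiv (-r) step)) * step else st.2)
          then (st.1 ++ [r], (if st.2 < r then (-(PySem.Int.floordiv (-r) step)) * step else st.2) + step)
          else (st.1, (if st.2 < r then (-(PySem.Int.floordiv (-r) step)) * step else st.2)))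
      (acc, m)).1
      = acc ++ l.filter (fun r => decide (PySem.Int.mod r step = 0)) := by
  intro l
  induction l with
  | nil => intro acc m _ _ _; simp
  | cons r t ih =>
    intro acc m hpw hdm hinv
    have hceil := (PySem.Int.neg_floordiv_neg_eq_iff_of_pos (a := r) (b := step)
      (q := -(PySem.Int.floordiv (-r) step)) hstep).1 rfl
    set q := -(PySem.Int.floordiv (-r) step) with hqdef
    have hrt : ∀ x ∈ t, r < x := (List.pairwise_cons.1 hpw).1
    rw [List.foldl_cons]
    simp only []
    by_cases hdr : step ∣ r
    · -- r is on the grid: the adjusted m equals r and r is appended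
      obtain ⟨k, hk⟩ := hdr
      have hqk : q = k := by nlinarith [hceil.1, hceil.2]
      have hm' : (if m < r then q * step else m) = r := by
        by_cases hmr : m < r
        · rw [if_pos hmr, hqk, hk]; ring
        · rw [if_neg hmr]
          have := hinv r (by simp) ⟨k, hk⟩
          omega
      rw [hm', if_pos rfl, ih (acc ++ [r]) (r + step) hpw.of_cons ⟨k + 1, by rw [hk]; ring⟩ ?side]
      · have hmod : PySem.Int.mod r step = 0 := (PySem.Int.mod_eq_zero_iff_dvd r step).2 ⟨k, hk⟩
        simp [hmod]
      case side =>
        intro x hx hdx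
        obtain ⟨j, hj⟩ := hdx
        have hrx : r < x := hrt x hx
        have hkj : k < j := by nlinarith
        nlinarith
    · -- r is off the grid: nothing is appended, m only jumps forward
      have hm'dvd : step ∣ (if m < r then q * step else m) := by
        by_cases hmr : m < r
        · rw [if_pos hmr]; exact ⟨q, mul_comm _ _⟩
        · rw [if_neg hmr]; exact hdm
      have hne : ¬ r = (if m < r then q * step else m) := by
        intro h
        apply hdr
        rw [h]
        exact hm'dvd
      rw [if_neg hne, ih acc _ hpw.of_cons hm'dvd ?side]
      · have hmod : ¬ PySem.Int.mod r step = 0 := fun h => hdr ((PySem.Int.mod_eq_zero_iff_dvd r step).1 h)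
        simp [hmod]
      case side =>
        intro x hx hdx
        obtain ⟨j, hj⟩ := hdx
        have hrx : r < x := hrt x hx
        by_cases hmr : m < r
        · rw [if_pos hmr]
          have h1 : (q - 1) * step < x := lt_trans hceil.1 hrx
          have hqj : q ≤ j := by nlinarith
          nlinarith
        · rw [if_neg hmr]
          exact hinv x (List.mem_cons_of_mem _ hx) ⟨j, hj⟩

-- the whole computation, stated over the shared sorted-deduplicated list
theorem main_core (s : List Int) (hpw : s.Pairwise (· < ·)) :
    (if s = [] then [] else
      if s.getLast! ≤ 10 then s else
      (fun (step : Int) =>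
        (fun (ticks : List Int) =>
          if s.getLast! ∉ ticks then ticks ++ [s.getLast!] else ticks)
        (s.foldl (fun acc r => if PySem.Int.mod r step = 0 ∧ r ∉ acc then acc ++ [r] else acc) [s.head!]))
      (if s.getLast! ≤ 30 then 5 else if s.getLast! ≤ 100 then 10 else max 10 (PySem.Int.floordiv s.getLast! 10)))
    = (if s = [] then [] else
      if s.getLast! ≤ 10 then s else
      (fun (step : Int) =>
        (fun (ticks : List Int) =>
          if s.getLast! ∉ ticks then ticks ++ [s.getLast!] else ticks)
        ((PySem.List.slice s (some 1) none).foldl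
          (fun (st : List Int × Int) r =>
          if r = (if st.2 < r then (-(PySem.Int.floordiv (-r) step)) * step else st.2)
          then (st.1 ++ [r], (if st.2 < r then (-(PySem.Int.floordiv (-r) step)) * step else st.2) + step)
          else (st.1, (if st.2 < r then (-(PySem.Int.floordiv (-r) step)) * step else st.2)))
          ([s.head!], (PySem.Int.floordiv s.head! step + 1) * step)).1)
      (if s.getLast! ≤ 30 then 5 else if s.getLast! ≤ 100 then 10 else max 10 (PySem.Int.floordiv s.getLast! 10))) := by
  cases s with
  | nil => rfl
  | cons lo t =>
    simp only [if_neg (List.cons_ne_nil lo t), List.head!_cons]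
    by_cases h10 : (lo :: t).getLast! ≤ 10
    · simp only [if_pos h10]
    · simp only [if_neg h10]
      set hi := (lo :: t).getLast! with hhi
      set step := (if hi ≤ 30 then (5:Int) else if hi ≤ 100 then 10 else max 10 (PySem.Int.floordiv hi 10)) with hstepdef
      have hstep : 0 < step := by
        rw [hstepdef]
        split_ifs with h1 h2
        · norm_num
        · norm_num
        · have := le_max_left (10:Int) (PySem.Int.floordiv hi 10); omega
      have hq := (PySem.Int.floordiv_eq_iff_of_pos (a := lo) (b := step) (q := PySem.Int.floordiv lo step) hstep).1 rfl
      have hA : (lo :: t).foldl (fun acc r => if PySem.Int.mod r step = 0 ∧ r ∉ acc then acc ++ [r] else acc) [lo]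
          = lo :: t.filter (fun r => decide (PySem.Int.mod r step = 0)) := by
        rw [List.foldl_cons]
        have h1 : (if PySem.Int.mod lo step = 0 ∧ lo ∉ [lo] then [lo] ++ [lo] else [lo]) = [lo] := by
          rw [if_neg]
          rintro ⟨_, h⟩
          exact h (by simp)
        rw [h1, foldA_eq_filter step t [lo] hpw.of_cons
          (fun y hy => by
            simp only [List.mem_singleton]
            exact ((List.pairwise_cons.1 hpw).1 y hy).ne')]
        rfl
      have hB : ((PySem.List.slice (lo :: t) (some 1) none).foldl
            (fun (st : List Int × Int) r =>
          if r = (if st.2 < r then (-(PySem.Int.floordiv (-r) step)) * step else st.2)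
          then (st.1 ++ [r], (if st.2 < r then (-(PySem.Int.floordiv (-r) step)) * step else st.2) + step)
          else (st.1, (if st.2 < r then (-(PySem.Int.floordiv (-r) step)) * step else st.2)))
            ([lo], (PySem.Int.floordiv lo step + 1) * step)).1
          = lo :: t.filter (fun r => decide (PySem.Int.mod r step = 0)) := by
        rw [PySem.List.slice_from_one, List.tail_cons]
        rw [foldB_eq_filter step hstep t [lo] _ hpw.of_cons ⟨PySem.Int.floordiv lo step + 1, by ring⟩ ?inv]
        · rfl
        case inv =>
          intro x hx hdx
          obtain ⟨j, hj⟩ := hdx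
          have hlox : lo < x := (List.pairwise_cons.1 hpw).1 x hx
          have h1 : PySem.Int.floordiv lo step * step < step * j := by omega
          have h2 : PySem.Int.floordiv lo step < j := by nlinarith
          nlinarith
      rw [hA, hB]

-- ===== VERDICT (by name: the statement is the Claim_ definition above) =====
theorem dynamic_xticks_spec : Claim_equal_dynamic_xticks := by
  intro rounds _
  show dynamic_xticks rounds = dynamic_xticks_alt rounds
  exact main_core _ (PySem.List.sorted_ofList_pairwise_lt rounds)
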